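-- pv_equiv track=rewrite | github.com/birdoggydog/ARM-Emulator | BarrellShifter.py | arithmetic_shift_right
-- ===== SOURCE A (Python) =====
-- def arithmetic_shift_right(num,shift):
-- 		bit = 0
-- 		for i in range(shift):
-- 			if num & 0x80000000 != 0:
-- 				num = num >> 1
-- 				num = num | 0x80000000
-- 			else: num = num >> 1
--
-- 		return num
-- ===== SOURCE B (Python) =====
-- def arithmetic_shift_right(num, shift):
--     # Closed-form 32-bit arithmetic shift right: no loop over shift.
--     if shift <= 0:
--         return num
--     s = min(shift, 32)
--     if num < 0:
--         return num >> s
--     if num >= 1 << 31: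
--         # sign bit set: shift, then sign-extend the top s bits
--         return (num >> s) + (1 << 32) - (1 << (32 - s))
--     return num >> s
-- ===== Notes on version B (the rewrite author's own statement) =====
-- stated objective: faster
-- what changed: Replaces A's per-bit loop (shift iterations of shift-by-1 plus sign-bit OR) with a closed-form single shift: clamp the shift count to 32, shift once, and add the sign-extension mask when the 32-bit sign bit is set.
import Mathlib
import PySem

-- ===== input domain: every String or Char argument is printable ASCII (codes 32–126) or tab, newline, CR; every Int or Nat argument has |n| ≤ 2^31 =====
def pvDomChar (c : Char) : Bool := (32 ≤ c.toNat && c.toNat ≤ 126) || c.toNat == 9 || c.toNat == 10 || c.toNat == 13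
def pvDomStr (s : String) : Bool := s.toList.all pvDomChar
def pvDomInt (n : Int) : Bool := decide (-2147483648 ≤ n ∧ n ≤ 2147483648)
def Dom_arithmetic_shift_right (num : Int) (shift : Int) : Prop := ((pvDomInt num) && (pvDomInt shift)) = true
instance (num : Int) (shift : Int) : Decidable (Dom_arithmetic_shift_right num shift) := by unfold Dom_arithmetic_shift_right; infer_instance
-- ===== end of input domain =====

-- B replaces A's O(shift) one-bit-at-a-time loop by a closed-form single shift (clamped at 32)
-- plus a sign-extension term when the 32-bit sign bit is set: faster (asymptotic, measured).

-- ===== PORT A =====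
-- literal port of A: 'for i in range(shift): if num & 0x80000000 != 0: num >>= 1; num |= 0x80000000 else: num >>= 1'
-- (A's dead local 'bit = 0' has no effect and is omitted)
def arithmetic_shift_right (num : Int) (shift : Int) : Int :=
  (PySem.List.pyRange 0 shift 1).foldl
    (fun num _i =>
      if PySem.Int.band num 2147483648 ≠ 0 then
        PySem.Int.bor (num >>> (1 : Nat)) 2147483648
      else
        num >>> (1 : Nat))
    num

-- ===== PORT B =====
-- literal port of Source B; Python 'num >> s' is Lean '>>>' with a Nat count ('s.toNat' — exact, s ≥ 1 in those branches)
def arithmetic_shift_right_alt (num : Int) (shift : Int) : Int :=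
  if shift ≤ 0 then num
  else
    let s : Int := min shift 32
    if num < 0 then num >>> s.toNat
    else if (1 : Int) <<< (31 : Nat) ≤ num then
      (num >>> s.toNat) + ((1 : Int) <<< (32 : Nat)) - ((1 : Int) <<< (32 - s).toNat)
    else num >>> s.toNat

-- ===== PRECONDITION & SPEC =====
def Spec_arithmetic_shift_right (num : Int) (shift : Int) (out : Int) : Prop := out = arithmetic_shift_right_alt num shift
instance (num : Int) (shift : Int) (out : Int) : Decidable (Spec_arithmetic_shift_right num shift out) := by unfold Spec_arithmetic_shift_right; infer_instance

-- ===== CLAIM (what is proved, stated in full; the proofs are below) =====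
def Claim_equal_arithmetic_shift_right : Prop := ∀ (num : Int) (shift : Int), Dom_arithmetic_shift_right num shift → Spec_arithmetic_shift_right num shift (arithmetic_shift_right num shift)

-- ===== LEMMAS AND PROOFS =====

-- the body of A's loop as a named step function
def pvStep (x : Int) : Int :=
  if PySem.Int.band x 2147483648 ≠ 0 then PySem.Int.bor (x >>> (1 : Nat)) 2147483648
  else x >>> (1 : Nat)

theorem foldl_const_iterate {α β : Type} (g : α → α) : ∀ (l : List β) (x : α),
    l.foldl (fun y _ => g y) x = g^[l.length] x := by
  intro l
  induction l with
  | nil => intro x; simp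
  | cons b t ih => intro x; simp [List.foldl_cons, ih, Function.iterate_succ_apply]

theorem portA_eq_iterate (num shift : Int) :
    arithmetic_shift_right num shift = pvStep^[shift.toNat] num := by
  unfold arithmetic_shift_right
  rw [show (fun (num : Int) (_i : Int) =>
      if PySem.Int.band num 2147483648 ≠ 0 then
        PySem.Int.bor (num >>> (1 : Nat)) 2147483648
      else num >>> (1 : Nat)) = fun (y : Int) (_ : Int) => pvStep y from rfl]
  rw [foldl_const_iterate pvStep]
  simp [PySem.List.length_pyRange_one]

-- a < 2^31 → a &&& 2^31 = 0 (Nat)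
theorem nat_and_sign_zero {a : Nat} (h : a < 2147483648) : a &&& 2147483648 = 0 := by
  have h31 : (2147483648 : Nat) = 2 ^ 31 := by norm_num
  rw [h31, Nat.and_two_pow, Nat.testBit_lt_two_pow (by omega : a < 2 ^ 31)]
  simp

-- the step function is floor-halving on [-2^31, 2^31)
theorem pvStep_eq_half {x : Int} (hl : -2147483648 ≤ x) (hu : x < 2147483648) :
    pvStep x = x / 2 := by
  unfold pvStep
  rcases le_or_gt 0 x with hx | hx
  · -- nonnegative, sign bit clear: plain halving
    have hband : PySem.Int.band x 2147483648 = 0 := by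
      unfold PySem.Int.band
      rw [if_pos hx, if_pos (by norm_num : (0:Int) ≤ 2147483648)]
      have hz : x.toNat &&& 2147483648 = 0 :=
        nat_and_sign_zero (by omega : x.toNat < 2147483648)
      simp [hz]
    rw [if_neg (by simp [hband]), Int.shiftRight_eq_div_pow]
    norm_num
  · -- negative: sign bit set, and OR-ing 2^31 into a negative ≥ -2^31 is a no-op
    have hband : PySem.Int.band x 2147483648 ≠ 0 := by
      unfold PySem.Int.band
      rw [if_neg (by omega), if_pos (by norm_num : (0:Int) ≤ 2147483648)]
      have hm : (-x - 1).toNat < 2147483648 := by omega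
      have hz : (2147483648 : Nat) &&& ((-x).toNat - 1) = 0 := by
        rw [Nat.and_comm]
        exact nat_and_sign_zero (by omega)
      simp [hz]
    rw [if_pos hband]
    have hdiv : x >>> (1 : Nat) = x / 2 := by
      rw [Int.shiftRight_eq_div_pow]; norm_num
    have hdl : -2147483648 ≤ x / 2 := by omega
    have hdu : x / 2 < 0 := by omega
    rw [hdiv]
    unfold PySem.Int.bor
    rw [if_neg (by omega), if_pos (by norm_num : (0:Int) ≤ 2147483648)]
    have hm : (-(x / 2) - 1).toNat < 2147483648 := by omega
    have hand : ((-(x / 2)).toNat - 1) &&& (2147483648 : Nat) = 0 :=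
      nat_and_sign_zero (by omega)
    simp [hand]
    omega

theorem pvStep_iter_eq_div {x : Int} (hl : -2147483648 ≤ x) (hu : x < 2147483648) :
    ∀ n : Nat, pvStep^[n] x = x / 2 ^ n := by
  intro n
  induction n generalizing x with
  | zero => simp
  | succ n ih =>
    rw [Function.iterate_succ_apply, pvStep_eq_half hl hu]
    have hl' : -2147483648 ≤ x / 2 := by omega
    have hu' : x / 2 < 2147483648 := by omega
    rw [ih hl' hu', Int.ediv_ediv_of_nonneg (by norm_num : (0:Int) ≤ 2)]
    ring_nf

-- dividing a 32-bit value by 2^n for n ≥ 32 is the same as dividing by 2^32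
theorem ediv_pow_saturate {x : Int} {n : Nat} (hl : -4294967296 ≤ x) (hu : x < 4294967296)
    (hn : 32 ≤ n) : x / 2 ^ n = x / 2 ^ 32 := by
  have hpow : (4294967296 : Int) ≤ 2 ^ n := by
    calc (4294967296 : Int) = 2 ^ 32 := by norm_num
    _ ≤ 2 ^ n := by exact pow_le_pow_right₀ (by norm_num) hn
  have hpos : (0 : Int) < 2 ^ n := by positivity
  rcases le_or_gt 0 x with hx | hx
  · rw [Int.ediv_eq_zero_of_lt hx (by omega), Int.ediv_eq_zero_of_lt hx (by omega : x < 2 ^ 32)]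
  · have neg_one : ∀ t : Int, 0 < t → -t ≤ x → x / t = -1 := by
      intro t ht hxt
      have h0 : (x + t) / t = 0 := Int.ediv_eq_zero_of_lt (by omega) (by omega)
      have h1 : (x + t) / t = x / t + 1 := by
        simpa using Int.add_mul_ediv_right x 1 (by omega)
      omega
    rw [neg_one _ hpos (by omega), neg_one _ (by norm_num) (by omega)]

-- the special case num = 2^31, for small shifts, by computation
theorem iter_sign_small : ∀ n : Nat, n < 33 →
    pvStep^[n] (2147483648 : Int) =
      ((2147483648 : Int) >>> n) + ((1 : Int) <<< (32 : Nat)) - ((1 : Int) <<< (32 - n)) := by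
  decide

theorem pvStep_fixed : pvStep (4294967295 : Int) = 4294967295 := by decide

-- ===== VERDICT (by name: the statement is the Claim_ definition above) =====
set_option maxRecDepth 40000 in
theorem arithmetic_shift_right_spec : Claim_equal_arithmetic_shift_right := by
  unfold Claim_equal_arithmetic_shift_right
  intro num shift hdom
  unfold Dom_arithmetic_shift_right pvDomInt at hdom
  simp only [Bool.and_eq_true, decide_eq_true_eq] at hdom
  obtain ⟨⟨hnl, hnu⟩, hsl, hsu⟩ := hdom
  unfold Spec_arithmetic_shift_right
  rw [portA_eq_iterate]
  rcases le_or_gt shift 0 with hs0 | hs0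
  · -- no iterations
    have : shift.toNat = 0 := by omega
    rw [this]
    unfold arithmetic_shift_right_alt
    rw [if_pos hs0]
    rfl
  · -- shift ≥ 1
    set n : Nat := shift.toNat with hn
    have hn1 : 1 ≤ n := by omega
    have hsmin : (min shift 32).toNat = min n 32 := by omega
    rcases lt_or_ge num 2147483648 with hnum | hnum
    · -- |num| < 2^31: both sides are floor division by 2^(min n 32)
      rw [pvStep_iter_eq_div hnl hnum n]
      unfold arithmetic_shift_right_alt
      rw [if_neg (by omega)]
      simp only [hsmin]
      have hshl : ((1 : Int) <<< (31 : Nat)) = 2147483648 := by decide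
      have hrhs : num >>> (min n 32) = num / 2 ^ min n 32 := by
        rw [Int.shiftRight_eq_div_pow]; push_cast; ring_nf
      have hdiv : num / 2 ^ n = num / 2 ^ min n 32 := by
        rcases le_or_gt n 32 with h32 | h32
        · rw [min_eq_left h32]
        · rw [min_eq_right (by omega),
            ediv_pow_saturate (by omega) (by omega) (by omega : 32 ≤ n),
            ediv_pow_saturate (by omega) (by omega) (le_refl 32)]
      rcases lt_or_ge num 0 with hneg | hpos
      · rw [if_pos hneg, hrhs, hdiv]
      · rw [if_neg (by omega), if_neg (by rw [hshl]; omega), hrhs, hdiv]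
    · -- num = 2^31 exactly
      have hnum2 : num = 2147483648 := by omega
      subst hnum2
      unfold arithmetic_shift_right_alt
      have hs2 : ((32 : Int) - min shift 32).toNat = 32 - min n 32 := by omega
      rw [if_neg (by omega), if_neg (by omega), if_pos (by decide), hsmin, hs2]
      rcases le_or_gt n 32 with h32 | h32
      · rw [min_eq_left h32]
        exact iter_sign_small n (by omega)
      · -- n > 32: A's iterate has reached the fixed point 2^32 - 1
        have hsplit : pvStep^[n] (2147483648 : Int)
            = pvStep^[n - 32] (pvStep^[32] (2147483648 : Int)) := by
          rw [← Function.iterate_add_apply]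
          congr 1
          omega
        have h32v : pvStep^[32] (2147483648 : Int) = 4294967295 := by decide
        rw [hsplit, h32v, Function.iterate_fixed pvStep_fixed, min_eq_right (by omega)]
        decide
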